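-- pv_equiv track=rewrite | github.com/ArtProPy/test_lexicom | Tasks/tasks1/test.py | service_center
-- ===== SOURCE A (Python) =====
-- from typing import List
--
-- def service_center(data: List[tuple]):
--     result = {}
--     for info in data:
--         key = f'{info[2]} {info[3]}'
--         value = f'{info[0]} - {info[1]}'
--         if result.get(key):
--             result[key] += f'; {value}'
--         else:
--             result[key] = value
--
--     return '\n'.join(f'{key}: {value}' for key, value in result.items())
-- ===== SOURCE B (Python) =====
-- from typing import List
--
-- def service_center(data: List[tuple]):
--     # Phase 1: distinct keys in first-occurrence order; Phase 2: rescan data per key.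
--     keys = list(dict.fromkeys(f'{info[2]} {info[3]}' for info in data))
--     lines = []
--     for key in keys:
--         values = '; '.join(f'{info[0]} - {info[1]}' for info in data
--                            if f'{info[2]} {info[3]}' == key)
--         lines.append(f'{key}: {values}')
--     return '\n'.join(lines)
-- ===== Notes on version B (the rewrite author's own statement) =====
-- stated objective: alternative
-- what changed: Replaced A's single-pass dict with per-key guarded string concatenation by a key-directed nested-scan algorithm: first collect the distinct keys in first-occurrence order, then for each key rescan the data, filter its records and join their values in one formatting step.
import Mathlib
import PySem

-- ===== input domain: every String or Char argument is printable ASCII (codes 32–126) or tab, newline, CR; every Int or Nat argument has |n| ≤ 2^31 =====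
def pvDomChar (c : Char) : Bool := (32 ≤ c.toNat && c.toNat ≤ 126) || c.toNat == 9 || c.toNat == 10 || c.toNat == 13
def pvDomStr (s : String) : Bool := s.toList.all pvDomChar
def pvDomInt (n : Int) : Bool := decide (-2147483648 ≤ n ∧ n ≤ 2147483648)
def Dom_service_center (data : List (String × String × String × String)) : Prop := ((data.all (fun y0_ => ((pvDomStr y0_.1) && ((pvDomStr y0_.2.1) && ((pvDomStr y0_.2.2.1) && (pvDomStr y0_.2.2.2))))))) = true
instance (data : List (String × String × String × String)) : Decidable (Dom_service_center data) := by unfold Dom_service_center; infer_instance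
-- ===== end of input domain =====

-- B replaces A's single-pass dict with guarded string accumulation by a key-directed
-- nested-scan algorithm: distinct keys first, then one filtered rescan of data per key
-- (alternative decomposition; same observable result).

-- ===== PORT A =====
-- loop body of A: if result.get(key): result[key] += '; '+value else result[key] = value
def pvAStep (result : PySem.Dict String String) (info : String × String × String × String) :
    PySem.Dict String String :=
  let key := info.2.2.1 ++ " " ++ info.2.2.2
  let value := info.1 ++ " - " ++ info.2.1
  if result.getD key "" ≠ "" then
    result.insert key (result.getD key "" ++ "; " ++ value)
  else
    result.insert key value

def service_center (data : List (String × String × String × String)) : String :=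
  let result := data.foldl pvAStep PySem.Dict.empty
  PySem.Str.join "\n" (result.items.map (fun kv => kv.1 ++ ": " ++ kv.2))

-- ===== PORT B =====
-- Source B: keys = list(dict.fromkeys(...)) then, per key, filter data and join the values
def service_center_alt (data : List (String × String × String × String)) : String :=
  let keys := PySem.List.dedup (data.map (fun info => info.2.2.1 ++ " " ++ info.2.2.2))
  let lines := keys.map (fun key =>
    key ++ ": " ++ PySem.Str.join "; "
      ((data.filter (fun info => (info.2.2.1 ++ " " ++ info.2.2.2) == key)).map
        (fun info => info.1 ++ " - " ++ info.2.1)))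
  PySem.Str.join "\n" lines

-- ===== PRECONDITION & SPEC =====
def Spec_service_center (data : List (String × String × String × String)) (out : String) : Prop := out = service_center_alt data
instance (data : List (String × String × String × String)) (out : String) : Decidable (Spec_service_center data out) := by unfold Spec_service_center; infer_instance

-- ===== CLAIM (what is proved, stated in full; the proofs are below) =====
def Claim_equal_service_center : Prop := ∀ (data : List (String × String × String × String)), Dom_service_center data → Spec_service_center data (service_center data)

-- ===== LEMMAS AND PROOFS =====

def pvKeyOf (info : String × String × String × String) : String := info.2.2.1 ++ " " ++ info.2.2.2
def pvValOf (info : String × String × String × String) : String := info.1 ++ " - " ++ info.2.1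

theorem pvValOf_ne_empty (info : String × String × String × String) : pvValOf info ≠ "" := by
  intro h
  have := congrArg String.toList h
  simp [pvValOf, String.toList_append] at this

-- A's step is an insert at pvKeyOf info
theorem pvAStep_eq (d : PySem.Dict String String) (info : String × String × String × String) :
    pvAStep d info = d.insert (pvKeyOf info)
      (if d.getD (pvKeyOf info) "" ≠ "" then d.getD (pvKeyOf info) "" ++ "; " ++ pvValOf info
       else pvValOf info) := by
  unfold pvAStep pvKeyOf pvValOf
  split <;> simp_all

-- A's per-key accumulated string, as a fold over that key's values
theorem pvA_getD (k : String) (l : List (String × String × String × String))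
    (d : PySem.Dict String String) :
    (l.foldl pvAStep d).getD k "" =
      List.foldl (fun s v => if s ≠ "" then s ++ "; " ++ v else v) (d.getD k "")
        ((l.filter (fun i => pvKeyOf i == k)).map pvValOf) := by
  induction l generalizing d with
  | nil => simp
  | cons i l ih =>
    simp only [List.foldl_cons]
    rw [ih, pvAStep_eq]
    by_cases h : pvKeyOf i = k
    · simp [h]
    · have : (pvKeyOf i == k) = false := by simp [h]
      simp [this, PySem.Dict.getD_insert, Ne.symm h]

theorem pvStrJoin_cons_cons (sep p q : String) (rest : List String) :
    PySem.Str.join sep (p :: q :: rest) = p ++ sep ++ PySem.Str.join sep (q :: rest) := by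
  apply String.toList_inj.mp
  simp [PySem.Str.toList_join, String.toList_append, PySem.Chars.join_cons_cons]

theorem pvJoin_singleton (sep v : String) : PySem.Str.join sep [v] = v := by
  apply String.toList_inj.mp
  simp [PySem.Str.toList_join, PySem.Chars.join, List.intercalate]

theorem pvJoin_shift (v w : String) (ws : List String) :
    PySem.Str.join "; " ((v ++ "; " ++ w) :: ws) = v ++ "; " ++ PySem.Str.join "; " (w :: ws) := by
  cases ws with
  | nil => rw [pvJoin_singleton, pvJoin_singleton]
  | cons u rest =>
    rw [pvStrJoin_cons_cons, pvStrJoin_cons_cons]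
    apply String.toList_inj.mp
    simp [String.toList_append]

theorem pvJoin_fold (v : String) (vs : List String) (hv : v ≠ "") (h : ∀ w ∈ vs, w ≠ "") :
    List.foldl (fun s v => if s ≠ "" then s ++ "; " ++ v else v) v vs =
      PySem.Str.join "; " (v :: vs) := by
  induction vs generalizing v with
  | nil => exact (pvJoin_singleton _ _).symm
  | cons w ws ih =>
    have hne : v ++ "; " ++ w ≠ "" := by
      intro hE
      have := congrArg String.toList hE
      simp [String.toList_append] at this
    simp only [List.foldl_cons, if_pos hv]
    rw [ih _ hne (fun x hx => h x (List.mem_cons_of_mem _ hx)), pvJoin_shift]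
    exact (pvStrJoin_cons_cons _ _ _ _).symm

theorem pvFold_eq_join (vs : List String) (h : ∀ w ∈ vs, w ≠ "") :
    List.foldl (fun s v => if s ≠ "" then s ++ "; " ++ v else v) "" vs =
      PySem.Str.join "; " vs := by
  cases vs with
  | nil => rfl
  | cons v ws =>
    simp only [List.foldl_cons, ne_eq, not_true_eq_false, if_false]
    exact pvJoin_fold v ws (h v List.mem_cons_self) (fun x hx => h x (List.mem_cons_of_mem _ hx))

-- A's fold written with the explicit insert shape (so the keys lemma applies)
theorem pvAFold_eq (data : List (String × String × String × String)) :
    data.foldl pvAStep PySem.Dict.empty =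
      List.foldl (fun d i => d.insert (pvKeyOf i)
        (if d.getD (pvKeyOf i) "" ≠ "" then d.getD (pvKeyOf i) "" ++ "; " ++ pvValOf i
         else pvValOf i)) PySem.Dict.empty data := by
  congr 1
  funext d i
  exact pvAStep_eq d i

theorem pvKeysA (data : List (String × String × String × String)) :
    (data.foldl pvAStep PySem.Dict.empty).keys =
      PySem.List.dedup (data.map pvKeyOf) := by
  rw [pvAFold_eq, PySem.Dict.keys_foldl_insert_key]
  simp [PySem.Set.update, PySem.Set.ofList_eq_foldl]

theorem pvNodupA (data : List (String × String × String × String)) :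
    (data.foldl pvAStep PySem.Dict.empty).keys.Nodup := by
  rw [pvAFold_eq]
  exact PySem.Dict.nodup_keys_foldl_insert_key _ _ _ _ PySem.Dict.nodup_keys_empty

-- ===== VERDICT (by name: the statement is the Claim_ definition above) =====
theorem service_center_spec : Claim_equal_service_center := by
  intro data _
  unfold Spec_service_center service_center service_center_alt
  dsimp only
  rw [PySem.Dict.items_eq_map_keys _ (pvNodupA data) "", pvKeysA data]
  simp only [List.map_map]
  congr 1
  apply List.map_congr_left
  intro k _
  have hget : (data.foldl pvAStep PySem.Dict.empty).getD k "" =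
      PySem.Str.join "; " ((data.filter (fun i => pvKeyOf i == k)).map pvValOf) := by
    rw [pvA_getD, PySem.Dict.getD_empty]
    apply pvFold_eq_join
    intro w hw
    rcases List.mem_map.mp hw with ⟨i, _, rfl⟩
    exact pvValOf_ne_empty i
  simp [hget, pvKeyOf]
  rfl
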